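-- pv_equiv track=rewrite | github.com/LuisEnilton/ExactCoverAlgorithm | Script/main.py | exact_cover_bruteforce
-- ===== SOURCE A (Python) =====
-- def exact_cover_bruteforce(X, F):
--     """
--     Resolve o problema da cobertura exata usando força bruta.
--
--     Parâmetros:
--     - X: Conjunto de elementos a serem cobertos.
--     - F: Conjunto de conjuntos, onde cada conjunto é um subconjunto de X.
--
--     Retorna:
--     - Uma lista de conjuntos que forma uma cobertura exata, ou None se não houver solução.
--     """
--     n = len(X)
--     m = len(F)
--
--     def is_solution(solution):
--         covered_elements = set()
--         for subset in solution:
--             # Verifica se algum elemento já está na cobertura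
--             if any(element in covered_elements for element in subset):
--                 return False
--             covered_elements.update(subset)
--         return covered_elements == set(X)
--
--     def backtrack(index, current_solution):
--         if index == m:
--             if is_solution(current_solution):
--                 return current_solution
--             return None
--
--         # Inclui o conjunto atual na solução
--         with_current = current_solution + [F[index]]
--         result_with_current = backtrack(index + 1, with_current)
--         if result_with_current:
--             return result_with_current
--
--         # Exclui o conjunto atual da solução
--         without_current = current_solution
--         result_without_current = backtrack(index + 1, without_current)
--         if result_without_current:
--             return result_without_current
--
--         return None
--
--     return backtrack(0, [])
-- ===== SOURCE B (Python) =====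
-- def exact_cover_bruteforce(X, F):
--     """Pruned backtracking: carries the covered set incrementally and skips a subset
--     as soon as it overlaps the cover or leaves X; include-first order."""
--     Xset = set(X)
--     m = len(F)
--
--     def solve(i, covered, chosen):
--         if i == m:
--             return chosen if covered == Xset else None
--         s = F[i]
--         if all(e in Xset and e not in covered for e in s):
--             r = solve(i + 1, covered | set(s), chosen + [s])
--             if r is not None:
--                 return r
--         return solve(i + 1, covered, chosen)
--
--     return solve(0, set(), [])
-- ===== Notes on version B (the rewrite author's own statement) =====
-- stated objective: faster
-- what changed: A blindly enumerates all 2^m include/exclude leaves and validates each complete selection from scratch; B carries the covered set incrementally and prunes a subset the moment it overlaps the cover or contains an element outside X, and B returns the empty cover for empty X where A's truthiness test drops it.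
-- intended difference: When X is empty, F is nonempty and F contains no empty subset, A returns None (Python's 'if result:' is false on the valid empty cover []), while B returns [], the intended exact cover of the empty set. — e.g. on exact_cover_bruteforce([], [[1]]): A returns none, B returns some []
import Mathlib
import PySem

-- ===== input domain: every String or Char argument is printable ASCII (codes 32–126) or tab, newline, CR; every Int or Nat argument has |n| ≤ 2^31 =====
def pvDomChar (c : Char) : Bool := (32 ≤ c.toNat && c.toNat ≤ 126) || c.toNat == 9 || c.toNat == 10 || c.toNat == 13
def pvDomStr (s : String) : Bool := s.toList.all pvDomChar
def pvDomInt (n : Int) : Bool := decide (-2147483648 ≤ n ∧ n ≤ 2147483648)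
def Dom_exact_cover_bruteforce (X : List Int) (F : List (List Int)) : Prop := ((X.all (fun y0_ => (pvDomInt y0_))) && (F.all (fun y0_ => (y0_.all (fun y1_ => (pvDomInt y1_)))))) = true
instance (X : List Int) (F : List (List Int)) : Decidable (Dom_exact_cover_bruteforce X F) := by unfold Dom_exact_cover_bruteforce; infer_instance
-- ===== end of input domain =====

-- B replaces A's enumerate-all-2^m-subsets-then-check search by pruned backtracking with an
-- incremental covered set (include-first order); B intentionally returns the empty cover where
-- A's Python truthiness test drops it (see D_ below).

-- ===== PORT A =====
-- is_solution's loop over the chosen subsets: none = the early `return False` on overlap,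
-- some c = covered_elements after the loop
def pvScanA (covered : PySem.Set Int) : List (List Int) → Option (PySem.Set Int)
  | [] => some covered
  | s :: rest =>
    if s.any (fun e => PySem.Set.contains covered e) then none
    else pvScanA (PySem.Set.update covered s) rest

def pvIsSolution (X : List Int) (sol : List (List Int)) : Bool :=
  match pvScanA PySem.Set.empty sol with
  | none => false
  | some c => PySem.Set.equal c (PySem.Set.ofList X)

-- Python truthiness of `result` (None or a list): false for None AND for the empty list
def pvTruthy (r : Option (List (List Int))) : Bool :=
  match r with
  | none => false
  | some l => !l.isEmpty

-- backtrack(index, current_solution): recursion over the suffix F[index:]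
def pvBacktrackA (X : List Int) : List (List Int) → List (List Int) → Option (List (List Int))
  | [], cur => if pvIsSolution X cur then some cur else none
  | s :: rest, cur =>
    let r1 := pvBacktrackA X rest (cur ++ [s])
    if pvTruthy r1 then r1
    else
      let r2 := pvBacktrackA X rest cur
      if pvTruthy r2 then r2 else none

def exact_cover_bruteforce (X : List Int) (F : List (List Int)) : Option (List (List Int)) :=
  pvBacktrackA X F []

-- ===== PORT B =====
def pvSolveB (Xset : PySem.Set Int) : List (List Int) → PySem.Set Int → List (List Int) → Option (List (List Int))
  | [], covered, chosen => if PySem.Set.equal covered Xset then some chosen else none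
  | s :: rest, covered, chosen =>
    if s.all (fun e => PySem.Set.contains Xset e && !PySem.Set.contains covered e) then
      match pvSolveB Xset rest (PySem.Set.union covered (PySem.Set.ofList s)) (chosen ++ [s]) with
      | some r => some r
      | none => pvSolveB Xset rest covered chosen
    else pvSolveB Xset rest covered chosen

def exact_cover_bruteforce_alt (X : List Int) (F : List (List Int)) : Option (List (List Int)) :=
  pvSolveB (PySem.Set.ofList X) F PySem.Set.empty []

-- ===== PRECONDITION & SPEC =====
-- When X is empty, F is nonempty and contains no empty subset, A returns None although the empty
-- selection is a valid exact cover (Python's `if result:` is false on the empty list), while B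
-- returns [], the intended empty cover.
def D_exact_cover_bruteforce (X : List Int) (F : List (List Int)) : Prop :=
  X = [] ∧ F ≠ [] ∧ ¬ ([] ∈ F)
instance (X : List Int) (F : List (List Int)) : Decidable (D_exact_cover_bruteforce X F) := by
  unfold D_exact_cover_bruteforce; infer_instance

def Spec_exact_cover_bruteforce (X : List Int) (F : List (List Int)) (out : Option (List (List Int))) : Prop := ¬ D_exact_cover_bruteforce X F → out = exact_cover_bruteforce_alt X F
instance (X : List Int) (F : List (List Int)) (out : Option (List (List Int))) : Decidable (Spec_exact_cover_bruteforce X F out) := by unfold Spec_exact_cover_bruteforce; infer_instance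

def pvDiffWitness_exact_cover_bruteforce : List Int × List (List Int) := ([], [[1]])
def pvDiffWitnessOut_exact_cover_bruteforce : (Option (List (List Int))) × (Option (List (List Int))) := (none, some [])

-- ===== CLAIM (what is proved, stated in full; the proofs are below) =====
def Claim_unchanged_exact_cover_bruteforce : Prop := ∀ (X : List Int) (F : List (List Int)), Dom_exact_cover_bruteforce X F → Spec_exact_cover_bruteforce X F (exact_cover_bruteforce X F)
def Claim_changed_exact_cover_bruteforce : Prop := Dom_exact_cover_bruteforce (pvDiffWitness_exact_cover_bruteforce.1) (pvDiffWitness_exact_cover_bruteforce.2) ∧ D_exact_cover_bruteforce (pvDiffWitness_exact_cover_bruteforce.1) (pvDiffWitness_exact_cover_bruteforce.2) ∧ exact_cover_bruteforce (pvDiffWitness_exact_cover_bruteforce.1) (pvDiffWitness_exact_cover_bruteforce.2) = pvDiffWitnessOut_exact_cover_bruteforce.1 ∧ exact_cover_bruteforce_alt (pvDiffWitness_exact_cover_bruteforce.1) (pvDiffWitness_exact_cover_bruteforce.2) = pvDiffWitnessOut_exact_cover_bruteforce.2 ∧ pvDiffWitnessOut_exact_cover_bruteforce.1 ≠ pvD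iffWitnessOut_exact_cover_bruteforce.2
def Claim_exact_exact_cover_bruteforce : Prop := ∀ (X : List Int) (F : List (List Int)), Dom_exact_cover_bruteforce X F → D_exact_cover_bruteforce X F → exact_cover_bruteforce X F ≠ exact_cover_bruteforce_alt X F

-- ===== LEMMAS AND PROOFS =====

-- the empty subsets of a family (proof-only helper)
def pvEmpties (l : List (List Int)) : List (List Int) := l.filter (fun s => s.isEmpty)

theorem pvIsEmpty_false {α : Type} (l : List α) (h : l ≠ []) : l.isEmpty = false := by
  cases l with
  | nil => exact absurd rfl h
  | cons a t => rfl

theorem pvScanA_append (l1 l2 : List (List Int)) (c : PySem.Set Int) :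
    pvScanA c (l1 ++ l2) = (pvScanA c l1).bind (fun c' => pvScanA c' l2) := by
  induction l1 generalizing c with
  | nil => simp [pvScanA]
  | cons s rest ih =>
    simp only [List.cons_append, pvScanA]
    split_ifs with h
    · rfl
    · exact ih _

theorem pvScanA_mem (l : List (List Int)) : ∀ (c c' : PySem.Set Int),
    pvScanA c l = some c' → ∀ x : Int, x ∈ c' ↔ x ∈ c ∨ ∃ s ∈ l, x ∈ s := by
  induction l with
  | nil =>
    intro c c' h
    simp only [pvScanA, Option.some.injEq] at h
    subst h; simp
  | cons s rest ih =>
    intro c c' h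
    simp only [pvScanA] at h
    split_ifs at h with hover
    intro x
    rw [ih _ _ h x, PySem.Set.mem_update]
    constructor
    · rintro ((h1 | h1) | h1)
      · exact Or.inl h1
      · exact Or.inr ⟨s, by simp, h1⟩
      · rcases h1 with ⟨t, ht, hx⟩; exact Or.inr ⟨t, by simp [ht], hx⟩
    · rintro (h1 | ⟨t, ht, hx⟩)
      · exact Or.inl (Or.inl h1)
      · rcases List.mem_cons.mp ht with h2 | h2
        · subst h2; exact Or.inl (Or.inr hx)
        · exact Or.inr ⟨t, h2, hx⟩

theorem pvEqual_congr (s t u : PySem.Set Int) (h : ∀ x : Int, x ∈ s ↔ x ∈ t) :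
    PySem.Set.equal s u = PySem.Set.equal t u := by
  by_cases h1 : PySem.Set.equal t u = true
  · rw [h1]
    exact (PySem.Set.equal_iff _ _).mpr fun x => (h x).trans ((PySem.Set.equal_iff _ _).mp h1 x)
  · rw [Bool.eq_false_iff.mpr h1, Bool.eq_false_iff]
    intro h2
    exact h1 ((PySem.Set.equal_iff _ _).mpr fun x =>
      (h x).symm.trans ((PySem.Set.equal_iff _ _).mp h2 x))

theorem pvEqual_false_of_bad (c u : PySem.Set Int) (x : Int) (hx : x ∈ c) (hnx : x ∉ u) :
    PySem.Set.equal c u = false := by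
  rw [Bool.eq_false_iff]
  intro h
  exact hnx (((PySem.Set.equal_iff _ _).mp h x).mp hx)

-- every leaf below a prefix whose covered set already escapes set(X) is invalid
theorem pvA_doomed (X : List Int) (rest : List (List Int)) : ∀ cur : List (List Int),
    (∀ c, pvScanA PySem.Set.empty cur = some c → ∃ x ∈ c, x ∉ PySem.Set.ofList X) →
    pvBacktrackA X rest cur = none := by
  induction rest with
  | nil =>
    intro cur h
    rcases hs : pvScanA PySem.Set.empty cur with _ | c
    · have hs' : pvScanA ([] : PySem.Set Int) cur = none := hs
      simp [pvBacktrackA, pvIsSolution, hs']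
    · rcases h c hs with ⟨x, hx, hnx⟩
      have hs' : pvScanA ([] : PySem.Set Int) cur = some c := hs
      simp [pvBacktrackA, pvIsSolution, hs', pvEqual_false_of_bad c _ x hx hnx]
  | cons s rest ih =>
    intro cur h
    have h1 : pvBacktrackA X rest (cur ++ [s]) = none := by
      apply ih
      intro c hc
      rw [pvScanA_append] at hc
      rcases hs : pvScanA PySem.Set.empty cur with _ | c0
      · rw [hs] at hc; simp at hc
      · rw [hs] at hc
        simp only [Option.bind, pvScanA] at hc
        split_ifs at hc with hover
        simp only [Option.some.injEq] at hc
        subst hc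
        rcases h c0 hs with ⟨x, hx, hnx⟩
        exact ⟨x, (PySem.Set.mem_update _ _ _).mpr (Or.inl hx), hnx⟩
    have h2 : pvBacktrackA X rest cur = none := ih cur h
    simp [pvBacktrackA, h1, h2, pvTruthy]

-- the result of B extends chosen; an empty result forces covered == Xset
theorem pvB_shape (Xs : PySem.Set Int) (rest : List (List Int)) :
    ∀ (covered : PySem.Set Int) (chosen r : List (List Int)),
    pvSolveB Xs rest covered chosen = some r →
    ∃ t, r = chosen ++ t ∧ (t = [] → PySem.Set.equal covered Xs = true) := by
  induction rest with
  | nil =>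
    intro covered chosen r h
    simp only [pvSolveB] at h
    split_ifs at h with he
    simp only [Option.some.injEq] at h
    exact ⟨[], by simp [h.symm], fun _ => he⟩
  | cons s rest ih =>
    intro covered chosen r h
    simp only [pvSolveB] at h
    split_ifs at h with hinc
    · cases h1 : pvSolveB Xs rest (PySem.Set.union covered (PySem.Set.ofList s)) (chosen ++ [s]) with
      | some r' =>
        rw [h1] at h
        simp only [Option.some.injEq] at h
        subst h
        rcases ih _ _ _ h1 with ⟨t, ht, _⟩
        exact ⟨[s] ++ t, by simp [ht], by simp⟩
      | none =>
        rw [h1] at h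
        exact ih _ _ _ h
    · exact ih _ _ _ h

-- main equivalence, on a nonempty X-set
theorem pvMain (X : List Int) (x0 : Int) (hx0 : x0 ∈ PySem.Set.ofList X)
    (rest : List (List Int)) :
    ∀ (chosen : List (List Int)) (covered covA : PySem.Set Int),
    pvScanA PySem.Set.empty chosen = some covA →
    (∀ x : Int, x ∈ covered ↔ x ∈ covA) →
    (∀ x ∈ covA, x ∈ PySem.Set.ofList X) →
    pvBacktrackA X rest chosen = pvSolveB (PySem.Set.ofList X) rest covered chosen := by
  induction rest with
  | nil =>
    intro chosen covered covA hA hmem hsub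
    simp only [pvBacktrackA, pvSolveB, pvIsSolution, hA]
    rw [pvEqual_congr covered covA _ hmem]
  | cons s rest ih =>
    intro chosen covered covA hA hmem hsub
    -- any value B returns is a nonempty list (X-set nonempty)
    have hne : ∀ r : List (List Int),
        pvSolveB (PySem.Set.ofList X) rest covered chosen = some r → r ≠ [] := by
      intro r hr hrnil
      rcases pvB_shape _ _ _ _ _ hr with ⟨t, ht, hteq⟩
      subst hrnil
      have hch : chosen = [] := by
        cases chosen with
        | nil => rfl
        | cons a b => simp at ht
      have htnil : t = [] := by rw [hch] at ht; simpa using ht.symm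
      have hcov : covA = [] := by
        rw [hch] at hA
        simpa [pvScanA, PySem.Set.empty] using hA.symm
      have hx0c : x0 ∈ covered := ((PySem.Set.equal_iff _ _).mp (hteq htnil) x0).mpr hx0
      rw [hmem, hcov] at hx0c
      simp at hx0c
    simp only [pvBacktrackA, pvSolveB]
    by_cases hinc : s.all (fun e => PySem.Set.contains (PySem.Set.ofList X) e && !PySem.Set.contains covered e) = true
    · -- the include branch is explored by both
      have hall : ∀ e ∈ s, e ∈ PySem.Set.ofList X ∧ e ∉ covered := by
        intro e he
        have h' := List.all_eq_true.mp hinc e he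
        simp only [Bool.and_eq_true, Bool.not_eq_true'] at h'
        refine ⟨(PySem.Set.contains_iff _ _).mp h'.1, fun hc => ?_⟩
        rw [(PySem.Set.contains_iff _ _).mpr hc] at h'
        simp at h'
      have hover : s.any (fun e => PySem.Set.contains covA e) = false := by
        rw [Bool.eq_false_iff]
        intro h'
        rcases List.any_eq_true.mp h' with ⟨e, he, hc⟩
        exact (hall e he).2 ((hmem e).mpr ((PySem.Set.contains_iff _ _).mp hc))
      have hA' : pvScanA PySem.Set.empty (chosen ++ [s]) = some (PySem.Set.update covA s) := by
        rw [pvScanA_append, hA]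
        show pvScanA covA [s] = some (PySem.Set.update covA s)
        simp only [pvScanA, hover, Bool.false_eq_true, if_false]
      have hmem' : ∀ x : Int, x ∈ PySem.Set.union covered (PySem.Set.ofList s) ↔
          x ∈ PySem.Set.update covA s := by
        intro x
        rw [PySem.Set.mem_union, PySem.Set.mem_ofList, PySem.Set.mem_update, hmem]
      have hsub' : ∀ x ∈ PySem.Set.update covA s, x ∈ PySem.Set.ofList X := by
        intro x hx
        rcases (PySem.Set.mem_update _ _ _).mp hx with h1 | h1
        · exact hsub x h1
        · exact (hall x h1).1
      have ih1 := ih (chosen ++ [s]) (PySem.Set.union covered (PySem.Set.ofList s))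
        (PySem.Set.update covA s) hA' hmem' hsub'
      have ih2 := ih chosen covered covA hA hmem hsub
      rw [if_pos hinc, ih1]
      cases h1 : pvSolveB (PySem.Set.ofList X) rest
          (PySem.Set.union covered (PySem.Set.ofList s)) (chosen ++ [s]) with
      | some r =>
        have hrne : r.isEmpty = false := by
          rcases pvB_shape _ _ _ _ _ h1 with ⟨t, ht, _⟩
          subst ht; simp
        simp [pvTruthy, hrne]
      | none =>
        rw [ih2]
        cases h2 : pvSolveB (PySem.Set.ofList X) rest covered chosen with
        | some r => simp [pvTruthy, pvIsEmpty_false r (hne r h2)]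
        | none => simp [pvTruthy]
    · -- A's include branch is doomed; B skips it
      have h1 : pvBacktrackA X rest (chosen ++ [s]) = none := by
        apply pvA_doomed
        intro c hc
        rw [pvScanA_append, hA] at hc
        simp only [Option.bind, pvScanA] at hc
        split_ifs at hc with hover
        simp only [Option.some.injEq] at hc
        subst hc
        have hnover : ∀ e ∈ s, e ∉ covA := by
          intro e he hec
          exact absurd (List.any_eq_true.mpr ⟨e, he, (PySem.Set.contains_iff _ _).mpr hec⟩)
            (by simp [hover])
        rcases List.all_eq_false.mp (Bool.eq_false_iff.mpr hinc) with ⟨e, he, hbad⟩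
        simp only [Bool.and_eq_true, Bool.not_eq_true', not_and, Bool.not_eq_false] at hbad
        have heX : e ∉ PySem.Set.ofList X := by
          intro hX
          have h2 : e ∈ covered :=
            (PySem.Set.contains_iff _ _).mp (hbad ((PySem.Set.contains_iff _ _).mpr hX))
          exact hnover e he ((hmem e).mp h2)
        exact ⟨e, (PySem.Set.mem_update _ _ _).mpr (Or.inr he), heX⟩
      rw [if_neg hinc, h1]
      have ih2 := ih chosen covered covA hA hmem hsub
      simp only [pvTruthy]
      rw [ih2]
      cases h2 : pvSolveB (PySem.Set.ofList X) rest covered chosen with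
      | some r => simp [pvIsEmpty_false r (hne r h2)]
      | none => simp

-- closed form of A when X = [] (set(X) is empty)
theorem pvA_emptyX (rest : List (List Int)) : ∀ cur : List (List Int),
    pvScanA PySem.Set.empty cur = some [] →
    pvBacktrackA [] rest cur =
      if (cur ++ pvEmpties rest).isEmpty then (if rest.isEmpty then some [] else none)
      else some (cur ++ pvEmpties rest) := by
  induction rest with
  | nil =>
    intro cur h
    have h' : pvScanA ([] : PySem.Set Int) cur = some [] := h
    cases cur with
    | nil => simp [pvBacktrackA, pvIsSolution, h', pvEmpties]
    | cons a b => simp [pvBacktrackA, pvIsSolution, h', pvEmpties]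
  | cons s rest ih =>
    intro cur h
    cases s with
    | nil =>
      have h' : pvScanA PySem.Set.empty (cur ++ [[]]) = some [] := by
        rw [pvScanA_append, h]; rfl
      have ih1 := ih (cur ++ [[]]) h'
      rw [pvIsEmpty_false _ (show (cur ++ [[]]) ++ pvEmpties rest ≠ [] by simp)] at ih1
      simp only [Bool.false_eq_true, if_false] at ih1
      have hemp : pvEmpties ([] :: rest) = [] :: pvEmpties rest := by simp [pvEmpties]
      simp only [pvBacktrackA]
      rw [ih1, if_pos (show pvTruthy (some ((cur ++ [[]]) ++ pvEmpties rest)) = true by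
        simp [pvTruthy]), hemp,
        pvIsEmpty_false _ (show cur ++ [] :: pvEmpties rest ≠ [] by simp)]
      simp
    | cons a s' =>
      have h1 : pvBacktrackA [] rest (cur ++ [a :: s']) = none := by
        apply pvA_doomed
        intro c hc
        refine ⟨a, (pvScanA_mem _ _ _ hc a).mpr (Or.inr ⟨a :: s', by simp, by simp⟩), ?_⟩
        simp
      have hemp : pvEmpties ((a :: s') :: rest) = pvEmpties rest := by simp [pvEmpties]
      have hL : pvBacktrackA [] ((a :: s') :: rest) cur =
          (if pvTruthy (pvBacktrackA [] rest cur) = true then pvBacktrackA [] rest cur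
           else none) := by
        simp only [pvBacktrackA]
        rw [h1]
        simp [pvTruthy]
      rw [hL, ih cur h, hemp]
      by_cases hce : (cur ++ pvEmpties rest).isEmpty = true
      · rw [if_pos hce, if_pos hce]
        cases rest with
        | nil => simp [pvTruthy]
        | cons r1 r2 => simp [pvTruthy]
      · rw [if_neg hce, if_neg hce]
        have hne2 : cur ++ pvEmpties rest ≠ [] := fun hh => hce (by simp [hh])
        simp [pvTruthy, pvIsEmpty_false _ hne2]

-- closed form of B when X = []
theorem pvB_emptyX (rest : List (List Int)) : ∀ chosen : List (List Int),
    pvSolveB (PySem.Set.ofList []) rest PySem.Set.empty chosen = some (chosen ++ pvEmpties rest) := by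
  induction rest with
  | nil =>
    intro chosen
    simp [pvSolveB, pvEmpties]
  | cons s rest ih =>
    intro chosen
    cases s with
    | nil =>
      have hu : PySem.Set.union PySem.Set.empty (PySem.Set.ofList ([] : List Int)) = PySem.Set.empty := rfl
      simp only [pvSolveB, List.all_nil, if_true, hu, ih (chosen ++ [[]])]
      simp [pvEmpties]
    | cons a s' =>
      have hall : ((a :: s').all (fun e => PySem.Set.contains (PySem.Set.ofList ([] : List Int)) e && !PySem.Set.contains PySem.Set.empty e)) = false :=
        List.all_eq_false.mpr ⟨a, by simp, by simp⟩
      simp only [pvSolveB, hall, Bool.false_eq_true, if_false, ih chosen]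
      simp [pvEmpties]

-- ===== VERDICT (by name: the statement is the Claim_ definition above) =====
theorem exact_cover_bruteforce_spec : Claim_unchanged_exact_cover_bruteforce := by
  intro X F _ hnD
  show exact_cover_bruteforce X F = exact_cover_bruteforce_alt X F
  unfold exact_cover_bruteforce exact_cover_bruteforce_alt
  cases X with
  | cons x0 X' =>
    exact pvMain (x0 :: X') x0 ((PySem.Set.mem_ofList _ _).mpr (by simp)) F []
      PySem.Set.empty PySem.Set.empty rfl (fun _ => Iff.rfl) (by simp [PySem.Set.empty])
  | nil =>
    rw [pvB_emptyX F [], pvA_emptyX F [] rfl]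
    simp only [List.nil_append]
    have hor : F = [] ∨ [] ∈ F := by
      rcases F with _ | ⟨f, fs⟩
      · exact Or.inl rfl
      · by_cases hm : [] ∈ f :: fs
        · exact Or.inr hm
        · exact absurd ⟨rfl, by simp, hm⟩ hnD
    rcases hor with h | h
    · subst h; rfl
    · have : [] ∈ pvEmpties F := by simp [pvEmpties, h]
      have hne : pvEmpties F ≠ [] := fun hh => by rw [hh] at this; simp at this
      rw [pvIsEmpty_false _ hne]
      simp

theorem exact_cover_bruteforce_changed : Claim_changed_exact_cover_bruteforce := by
  unfold Claim_changed_exact_cover_bruteforce; decide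

theorem exact_cover_bruteforce_tight : Claim_exact_exact_cover_bruteforce := by
  intro X F _ hD
  obtain ⟨hX, hF, hno⟩ := hD
  subst hX
  show exact_cover_bruteforce [] F ≠ exact_cover_bruteforce_alt [] F
  unfold exact_cover_bruteforce exact_cover_bruteforce_alt
  rw [pvB_emptyX F [], pvA_emptyX F [] rfl]
  have hemp : pvEmpties F = [] := by
    apply List.filter_eq_nil_iff.mpr
    intro s hs
    simp only [Bool.not_eq_true]
    apply pvIsEmpty_false
    intro hnil
    exact hno (hnil ▸ hs)
  rw [hemp]
  simp [pvIsEmpty_false F hF]
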